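-- pv_equiv track=rewrite | github.com/9sub/Algorithm | 프로그래머스/lv2/169198. 당구 연습/당구 연습.py | solution
-- ===== SOURCE A (Python) =====
-- def solution(m, n, startx, starty, balls):
--     answer = []
--
--     for ball in balls:
--         diffx = startx-ball[0]
--         diffy = starty-ball[1]
--
--         left = (startx+ball[0])**2 + (diffy)**2
--         right = (m-startx+m-ball[0])**2 + (diffy)**2
--         up = (diffx)**2+(n-starty+n-ball[1])**2
--         down=(diffx)**2+(starty+ball[1])**2
--
--         if diffx == 0:
--             if diffy>0:
--                 res = min(left,right,up)
--             else:
--                 res = min(left,right,down)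
--         elif diffy==0:
--             if diffx>0:
--                 res = min(right,up,down)
--             else:
--                 res = min(left,up,down)
--         else:
--             res = min(left,right,up,down)
--
--         answer.append(res)
--
--     return answer
-- ===== SOURCE B (Python) =====
-- def solution(m, n, startx, starty, balls):
--     # staged passes: one pass per wall producing a column of candidate squared
--     # distances (None where the real ball blocks the path to that wall),
--     # then an elementwise-min combine across the four columns.
--     def wall_pass(reflect, blocked):
--         col = []
--         for b in balls:
--             bx, by = b[0], b[1]
--             if blocked(bx, by):
--                 col.append(None)
--             else:
--                 rx, ry = reflect(bx, by)
--                 col.append((startx - rx) ** 2 + (starty - ry) ** 2)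
--         return col
--
--     cols = [
--         wall_pass(lambda x, y: (-x, y),        lambda x, y: y == starty and x < startx),
--         wall_pass(lambda x, y: (2 * m - x, y), lambda x, y: y == starty and x > startx),
--         wall_pass(lambda x, y: (x, 2 * n - y), lambda x, y: x == startx and y >= starty),
--         wall_pass(lambda x, y: (x, -y),        lambda x, y: x == startx and y < starty),
--     ]
--     return [min(v for v in col if v is not None) for col in zip(*cols)]
-- ===== Notes on version B (the rewrite author's own statement) =====
-- stated objective: alternative
-- what changed: B inverts the loop nesting: it makes one staged pass per wall over all balls, producing four columns of candidate squared distances (None where the real ball blocks that wall), and then combines the columns with an elementwise min, instead of A's per-ball nested branch selection among four pre-named minima.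
import Mathlib
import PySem

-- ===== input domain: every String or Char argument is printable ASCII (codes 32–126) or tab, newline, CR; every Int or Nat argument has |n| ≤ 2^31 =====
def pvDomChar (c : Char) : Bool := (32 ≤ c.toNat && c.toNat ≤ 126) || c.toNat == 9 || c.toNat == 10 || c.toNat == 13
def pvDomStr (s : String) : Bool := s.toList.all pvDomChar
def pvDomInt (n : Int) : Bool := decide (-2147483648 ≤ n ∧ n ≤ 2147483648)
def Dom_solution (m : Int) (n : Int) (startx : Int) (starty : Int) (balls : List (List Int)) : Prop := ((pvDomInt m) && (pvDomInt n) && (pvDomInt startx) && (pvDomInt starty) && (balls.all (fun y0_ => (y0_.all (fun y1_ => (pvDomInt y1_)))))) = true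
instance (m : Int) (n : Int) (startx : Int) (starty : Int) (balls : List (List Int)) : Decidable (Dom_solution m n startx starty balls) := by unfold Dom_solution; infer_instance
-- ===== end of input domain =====

-- B inverts the loop nesting: one staged pass per wall over all balls (none where the
-- real ball blocks that wall), then an elementwise-min combine of the four columns
-- (objective: alternative decomposition, same cost).

-- ===== PORT A =====
def solution (m : Int) (n : Int) (startx : Int) (starty : Int) (balls : List (List Int)) : List Int :=
  balls.foldl (fun answer ball =>
    let b0 := (PySem.List.pyGet? ball 0).getD 0
    let b1 := (PySem.List.pyGet? ball 1).getD 0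
    let diffx := startx - b0
    let diffy := starty - b1
    let left := (startx + b0) * (startx + b0) + diffy * diffy
    let right := (m - startx + m - b0) * (m - startx + m - b0) + diffy * diffy
    let up := diffx * diffx + (n - starty + n - b1) * (n - starty + n - b1)
    let down := diffx * diffx + (starty + b1) * (starty + b1)
    let res :=
      if diffx = 0 then
        if diffy > 0 then min left (min right up)
        else min left (min right down)
      else if diffy = 0 then
        if diffx > 0 then min right (min up down)
        else min left (min up down)
      else min left (min right (min up down))
    answer ++ [res]) []

-- ===== PORT B =====
-- one pass per wall: a column of candidate squared distances (none = wall blocked)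
def pvWallPass (startx : Int) (starty : Int) (balls : List (List Int))
    (reflect : Int → Int → Int × Int) (blocked : Int → Int → Bool) : List (Option Int) :=
  balls.map (fun b =>
    let bx := (PySem.List.pyGet? b 0).getD 0
    let by_ := (PySem.List.pyGet? b 1).getD 0
    if blocked bx by_ then none
    else
      let r := reflect bx by_
      some ((startx - r.1) * (startx - r.1) + (starty - r.2) * (starty - r.2)))

-- elementwise combine: min of the non-none entries of each row
def pvComb4 : List (Option Int) → List (Option Int) → List (Option Int) → List (Option Int) → List Int
  | a :: as, b :: bs, c :: cs, d :: ds =>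
      ((PySem.List.min? (([a, b, c, d].filterMap id)) (fun v => v)).getD 0) :: pvComb4 as bs cs ds
  | _, _, _, _ => []

def solution_alt (m : Int) (n : Int) (startx : Int) (starty : Int) (balls : List (List Int)) : List Int :=
  pvComb4
    (pvWallPass startx starty balls (fun x y => (-x, y)) (fun x y => y == starty && decide (x < startx)))
    (pvWallPass startx starty balls (fun x y => (2 * m - x, y)) (fun x y => y == starty && decide (x > startx)))
    (pvWallPass startx starty balls (fun x y => (x, 2 * n - y)) (fun x y => x == startx && decide (y ≥ starty)))
    (pvWallPass startx starty balls (fun x y => (x, -y)) (fun x y => x == startx && decide (y < starty)))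

-- ===== PRECONDITION & SPEC =====
-- Pre_ excludes exactly the balls shorter than two entries, on which A's
-- ball[0]/ball[1] raises IndexError (B raises there too).
def Pre_solution (m : Int) (n : Int) (startx : Int) (starty : Int) (balls : List (List Int)) : Prop :=
  ∀ b ∈ balls, 2 ≤ b.length
instance (m : Int) (n : Int) (startx : Int) (starty : Int) (balls : List (List Int)) : Decidable (Pre_solution m n startx starty balls) := by unfold Pre_solution; infer_instance

def pvWitness_solution : Int × Int × Int × Int × List (List Int) := (10, 10, 3, 7, [[7, 7], [2, 7], [7, 3]])

def Spec_solution (m : Int) (n : Int) (startx : Int) (starty : Int) (balls : List (List Int)) (out : List Int) : Prop := out = solution_alt m n startx starty balls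
instance (m : Int) (n : Int) (startx : Int) (starty : Int) (balls : List (List Int)) (out : List Int) : Decidable (Spec_solution m n startx starty balls out) := by unfold Spec_solution; infer_instance

-- ===== CLAIM =====
def Claim_equal_solution : Prop := ∀ (m : Int) (n : Int) (startx : Int) (starty : Int) (balls : List (List Int)), Dom_solution m n startx starty balls → Pre_solution m n startx starty balls → Spec_solution m n startx starty balls (solution m n startx starty balls)

-- ===== LEMMAS AND PROOFS =====

-- A's append-accumulator loop is a map.
theorem pv_foldl_append_map {α β : Type} (f : α → β) (xs : List α) (acc : List β) :
    xs.foldl (fun a x => a ++ [f x]) acc = acc ++ xs.map f := by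
  induction xs generalizing acc with
  | nil => simp
  | cons x t ih => simp [List.foldl_cons, ih]

-- the four-column combine of maps over the same list is a map of the rowwise combine
theorem pv_comb4_map {α : Type} (f1 f2 f3 f4 : α → Option Int) (xs : List α) :
    pvComb4 (xs.map f1) (xs.map f2) (xs.map f3) (xs.map f4)
      = xs.map (fun x =>
          ((PySem.List.min? (([f1 x, f2 x, f3 x, f4 x].filterMap id)) (fun v => v)).getD 0)) := by
  induction xs with
  | nil => simp [pvComb4]
  | cons h t ih => simp [pvComb4, ih]

-- A's branch-selected min equals the rowwise min of the four option candidates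
-- (canonical blocked conditions in terms of dx = startx-bx, dy = starty-by).
theorem pv_row_eq (dx dy L R U D : Int) :
    (if dx = 0 then
       if dy > 0 then min L (min R U)
       else min L (min R D)
     else if dy = 0 then
       if dx > 0 then min R (min U D)
       else min L (min U D)
     else min L (min R (min U D))) =
    (PySem.List.min?
      (([ (if (dy == 0 && decide (dx > 0)) then none else some L),
          (if (dy == 0 && decide (dx < 0)) then none else some R),
          (if (dx == 0 && decide (dy ≤ 0)) then none else some U),
          (if (dx == 0 && decide (dy > 0)) then none else some D) ] : List (Option Int)).filterMap id)
      (fun v => v)).getD 0 := by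
  by_cases hx : dx = 0
  · by_cases hy : dy > 0
    · have e2 : ((dy : Int) == 0) = false := by simp; omega
      have e3 : decide ((dy : Int) ≤ 0) = false := by simp; omega
      simp [hx, hy, e2, e3, List.filterMap, PySem.List.min?_id_cons, List.foldl]
    · have e3 : decide ((dy : Int) ≤ 0) = true := by simp; omega
      have e5 : decide ((dx : Int) > 0) = false := by simp [hx]
      have e6 : decide ((dx : Int) < 0) = false := by simp [hx]
      simp [hx, hy, e3, e5, e6, List.filterMap, PySem.List.min?_id_cons, List.foldl]
  · by_cases hy0 : dy = 0
    · have e1 : ((dx : Int) == 0) = false := by simp [hx]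
      by_cases hxp : dx > 0
      · have e6 : decide ((dx : Int) < 0) = false := by simp; omega
        simp [hx, hy0, hxp, e1, e6, List.filterMap, PySem.List.min?_id_cons, List.foldl]
      · have e5 : decide ((dx : Int) > 0) = false := by simp; omega
        have e6 : decide ((dx : Int) < 0) = true := by simp; omega
        simp [hx, hy0, hxp, e1, e5, e6, List.filterMap, PySem.List.min?_id_cons, List.foldl]
    · have e1 : ((dx : Int) == 0) = false := by simp [hx]
      have e2 : ((dy : Int) == 0) = false := by simp [hy0]
      simp [hx, hy0, e1, e2, List.filterMap, PySem.List.min?_id_cons, List.foldl]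

-- per-ball agreement of A's branch body with B's rowwise combine of the four columns
theorem pv_ball_eq (m n startx starty b0 b1 : Int) :
    (if startx - b0 = 0 then
       if starty - b1 > 0 then
         min ((startx + b0) * (startx + b0) + (starty - b1) * (starty - b1))
             (min ((m - startx + m - b0) * (m - startx + m - b0) + (starty - b1) * (starty - b1))
                  ((startx - b0) * (startx - b0) + (n - starty + n - b1) * (n - starty + n - b1)))
       else
         min ((startx + b0) * (startx + b0) + (starty - b1) * (starty - b1))
             (min ((m - startx + m - b0) * (m - startx + m - b0) + (starty - b1) * (starty - b1))
                  ((startx - b0) * (startx - b0) + (starty + b1) * (starty + b1)))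
     else if starty - b1 = 0 then
       if startx - b0 > 0 then
         min ((m - startx + m - b0) * (m - startx + m - b0) + (starty - b1) * (starty - b1))
             (min ((startx - b0) * (startx - b0) + (n - starty + n - b1) * (n - starty + n - b1))
                  ((startx - b0) * (startx - b0) + (starty + b1) * (starty + b1)))
       else
         min ((startx + b0) * (startx + b0) + (starty - b1) * (starty - b1))
             (min ((startx - b0) * (startx - b0) + (n - starty + n - b1) * (n - starty + n - b1))
                  ((startx - b0) * (startx - b0) + (starty + b1) * (starty + b1)))
     else
       min ((startx + b0) * (startx + b0) + (starty - b1) * (starty - b1))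
           (min ((m - startx + m - b0) * (m - startx + m - b0) + (starty - b1) * (starty - b1))
                (min ((startx - b0) * (startx - b0) + (n - starty + n - b1) * (n - starty + n - b1))
                     ((startx - b0) * (startx - b0) + (starty + b1) * (starty + b1))))) =
    (PySem.List.min?
      (([ (if (b1 == starty && decide (b0 < startx)) then none
           else some ((startx - -b0) * (startx - -b0) + (starty - b1) * (starty - b1))),
          (if (b1 == starty && decide (b0 > startx)) then none
           else some ((startx - (2 * m - b0)) * (startx - (2 * m - b0)) + (starty - b1) * (starty - b1))),
          (if (b0 == startx && decide (b1 ≥ starty)) then none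
           else some ((startx - b0) * (startx - b0) + (starty - (2 * n - b1)) * (starty - (2 * n - b1)))),
          (if (b0 == startx && decide (b1 < starty)) then none
           else some ((startx - b0) * (startx - b0) + (starty - -b1) * (starty - -b1))) ] : List (Option Int)).filterMap id)
      (fun v => v)).getD 0 := by
  have cL : ((b1 == starty && decide (b0 < startx)) : Bool)
      = (((starty - b1 : Int) == 0) && decide ((startx - b0 : Int) > 0)) := by
    by_cases h1 : b1 = starty <;> by_cases h2 : b0 < startx <;> simp [h1, h2] <;> omega
  have cR : ((b1 == starty && decide (b0 > startx)) : Bool)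
      = (((starty - b1 : Int) == 0) && decide ((startx - b0 : Int) < 0)) := by
    by_cases h1 : b1 = starty <;> by_cases h2 : b0 > startx <;> simp [h1, h2] <;> omega
  have cU : ((b0 == startx && decide (b1 ≥ starty)) : Bool)
      = (((startx - b0 : Int) == 0) && decide ((starty - b1 : Int) ≤ 0)) := by
    by_cases h1 : b0 = startx <;> by_cases h2 : b1 ≥ starty <;> simp [h1, h2] <;> omega
  have cD : ((b0 == startx && decide (b1 < starty)) : Bool)
      = (((startx - b0 : Int) == 0) && decide ((starty - b1 : Int) > 0)) := by
    by_cases h1 : b0 = startx <;> by_cases h2 : b1 < starty <;> simp [h1, h2] <;> omega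
  have eL : (startx - -b0) * (startx - -b0) + (starty - b1) * (starty - b1)
      = (startx + b0) * (startx + b0) + (starty - b1) * (starty - b1) := by ring
  have eR : (startx - (2 * m - b0)) * (startx - (2 * m - b0)) + (starty - b1) * (starty - b1)
      = (m - startx + m - b0) * (m - startx + m - b0) + (starty - b1) * (starty - b1) := by ring
  have eU : (startx - b0) * (startx - b0) + (starty - (2 * n - b1)) * (starty - (2 * n - b1))
      = (startx - b0) * (startx - b0) + (n - starty + n - b1) * (n - starty + n - b1) := by ring
  have eD : (startx - b0) * (startx - b0) + (starty - -b1) * (starty - -b1)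
      = (startx - b0) * (startx - b0) + (starty + b1) * (starty + b1) := by ring
  rw [cL, cR, cU, cD, eL, eR, eU, eD]
  exact pv_row_eq (startx - b0) (starty - b1) _ _ _ _

-- ===== VERDICT =====
theorem solution_spec : Claim_equal_solution := by
  intro m n startx starty balls _ _
  unfold Spec_solution solution solution_alt pvWallPass
  rw [pv_foldl_append_map, pv_comb4_map]
  simp only [List.nil_append]
  apply List.map_congr_left
  intro ball _
  exact pv_ball_eq m n startx starty ((PySem.List.pyGet? ball 0).getD 0) ((PySem.List.pyGet? ball 1).getD 0)
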